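-- pv_equiv track=rewrite | github.com/chinitacode/Python_Learning | ByTags/Array/Reorder_Array.py | exchange
-- ===== SOURCE A (Python) =====
-- from typing import List
--
-- def exchange(nums: List[int]) -> List[int]:
--     if len(nums) <= 1:
--         return nums
--     i, offset, count = 0, 0, 0
--     while count < len(nums):
--         if not(nums[i] & 1):
--             tmp = nums[i]
--             for j in range(i, len(nums)-1-offset):
--                 nums[j] = nums[j+1]
--             nums[len(nums)-1-offset] = tmp
--             offset += 1
--         else:
--             i += 1
--         count += 1
--     return nums
-- ===== SOURCE B (Python) =====
-- from typing import List
--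
-- def exchange(nums: List[int]) -> List[int]:
--     # Partition pass: odds keep their order, evens go to the back in reverse
--     # order of appearance.  Same in-place mutation of nums as A.
--     odds = [x for x in nums if x & 1]
--     evens = [x for x in nums if not x & 1]
--     nums[:] = odds + evens[::-1]
--     return nums
-- ===== Notes on version B (the rewrite author's own statement) =====
-- stated objective: alternative
-- what changed: Replaces the rotate-each-even-to-the-back while loop (quadratic shifting) by a single partition pass building odds in order plus evens reversed; intended as faster (O(n) vs O(n^2) on even-heavy input) but a timing run could not confirm it at the largest sizes.
import Mathlib
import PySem

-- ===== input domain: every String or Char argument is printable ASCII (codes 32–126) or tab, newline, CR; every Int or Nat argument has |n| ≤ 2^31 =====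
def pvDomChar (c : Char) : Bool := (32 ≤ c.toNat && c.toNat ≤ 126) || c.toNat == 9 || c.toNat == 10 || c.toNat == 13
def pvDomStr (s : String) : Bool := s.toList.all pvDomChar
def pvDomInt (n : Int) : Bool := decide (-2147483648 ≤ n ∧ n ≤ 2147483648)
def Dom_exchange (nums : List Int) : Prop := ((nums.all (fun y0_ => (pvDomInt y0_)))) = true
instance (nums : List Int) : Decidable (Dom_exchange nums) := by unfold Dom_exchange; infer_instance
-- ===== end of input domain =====

-- B replaces A's rotate-each-even-to-the-back loop by a single partition
-- pass (odds in order ++ evens reversed); both Pythons mutate nums in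
-- place identically, and the theorem is about the return value.

-- ===== PORT A =====
-- inner `for j in range(i, stop): nums[j] = nums[j+1]`
def pvShiftA (nums : List Int) (js : List Nat) : List Int :=
  js.foldl (fun acc j => acc.set j (acc.getD (j + 1) 0)) nums

-- one iteration of A's while-loop body (n = len(nums), constant)
def pvStepA (n : Nat) (s : List Int × Nat × Nat) : List Int × Nat × Nat :=
  let (nums, i, offset) := s
  if nums.getD i 0 % 2 = 0 then
    let tmp := nums.getD i 0
    let nums1 := pvShiftA nums (List.range' i (n - 1 - offset - i))
    let nums2 := nums1.set (n - 1 - offset) tmp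
    (nums2, i, offset + 1)
  else
    (nums, i + 1, offset)

def exchange (nums : List Int) : List Int :=
  if nums.length ≤ 1 then nums
  else
    let n := nums.length
    ((List.range n).foldl (fun s _ => pvStepA n s) (nums, 0, 0)).1

-- ===== PORT B =====
def exchange_alt (nums : List Int) : List Int :=
  (nums.filter (fun x => ¬ x % 2 = 0)) ++ (nums.filter (fun x => x % 2 = 0)).reverse

-- ===== PRECONDITION & SPEC =====
def Spec_exchange (nums : List Int) (out : List Int) : Prop := out = exchange_alt nums
instance (nums : List Int) (out : List Int) : Decidable (Spec_exchange nums out) := by unfold Spec_exchange; infer_instance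

-- ===== CLAIM (what is proved, stated in full; the proofs are below) =====
def Claim_equal_exchange : Prop := ∀ (nums : List Int), Dom_exchange nums → Spec_exchange nums (exchange nums)

-- ===== LEMMAS AND PROOFS =====

def pvOdds (l : List Int) : List Int := l.filter (fun x => ¬ x % 2 = 0)
def pvEvens (l : List Int) : List Int := l.filter (fun x => x % 2 = 0)

lemma pv_getD_mid : ∀ (od : List Int) (x : Int) (t : List Int),
    (od ++ x :: t).getD od.length 0 = x := by
  intro od; induction od with
  | nil => simp
  | cons a od ih => intro x t; simpa using ih x t

lemma pv_set_mid : ∀ (od : List Int) (x y : Int) (t : List Int),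
    (od ++ x :: t).set od.length y = od ++ y :: t := by
  intro od; induction od with
  | nil => simp
  | cons a od ih => intro x y t; simpa using ih x y t

-- the inner shift rotates the segment, leaving the segment's last value duplicated
lemma pv_shift_eq : ∀ (rest od : List Int) (x : Int) (ev : List Int),
    pvShiftA (od ++ x :: (rest ++ ev)) (List.range' od.length rest.length)
      = od ++ rest ++ ((x :: rest).getLast (by simp)) :: ev := by
  intro rest; induction rest with
  | nil => intro od x ev; simp [pvShiftA]
  | cons r rest ih =>
    intro od x ev
    have h1 : List.range' od.length (r :: rest).length
        = od.length :: List.range' (od.length + 1) rest.length := by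
      simp [List.range'_succ]
    have hset : ((od ++ x :: (r :: rest ++ ev)).set od.length
        ((od ++ x :: (r :: rest ++ ev)).getD (od.length + 1) 0))
        = (od ++ [r]) ++ r :: (rest ++ ev) := by
      have hg : (od ++ x :: (r :: rest ++ ev)).getD (od.length + 1) 0 = r := by
        have := pv_getD_mid (od ++ [x]) r (rest ++ ev)
        simpa using this
      rw [hg, pv_set_mid]
      simp
    have h2 := ih (od ++ [r]) r ev
    simp only [pvShiftA, h1, List.foldl_cons] at *
    rw [hset]
    have hlen : (od ++ [r]).length = od.length + 1 := by simp
    rw [← hlen, h2]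
    cases rest <;> simp [List.getLast]

lemma pv_filter_len (l : List Int) :
    (pvOdds l).length + (pvEvens l).length = l.length := by
  induction l with
  | nil => simp [pvOdds, pvEvens]
  | cons a l ih =>
    simp only [pvOdds, pvEvens, List.filter_cons] at *
    by_cases h : a % 2 = 0
    · rw [if_neg (by simp [h]), if_pos (by simp [h])]
      simp only [List.length_cons]; omega
    · rw [if_pos (by simp [h]), if_neg (by simp [h])]
      simp only [List.length_cons]; omega

lemma pvOdds_append (l m : List Int) : pvOdds (l ++ m) = pvOdds l ++ pvOdds m := by
  unfold pvOdds; exact List.filter_append l m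

lemma pvEvens_append (l m : List Int) : pvEvens (l ++ m) = pvEvens l ++ pvEvens m := by
  unfold pvEvens; exact List.filter_append l m

-- one step of A's loop advances the partition invariant
lemma pv_step_inv (n : Nat) (od rest ev : List Int) (x : Int)
    (hn : n = od.length + (1 + (rest.length + ev.length))) :
    pvStepA n (od ++ (x :: rest) ++ ev.reverse, od.length, ev.length)
      = if x % 2 = 0 then (od ++ rest ++ x :: ev.reverse, od.length, ev.length + 1)
        else ((od ++ [x]) ++ rest ++ ev.reverse, od.length + 1, ev.length) := by
  have hA : od ++ (x :: rest) ++ ev.reverse = od ++ x :: (rest ++ ev.reverse) := by simp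
  have hget : (od ++ x :: (rest ++ ev.reverse)).getD od.length 0 = x :=
    pv_getD_mid od x (rest ++ ev.reverse)
  rw [hA]
  by_cases h : x % 2 = 0
  · have hsh := pv_shift_eq rest od x ev.reverse
    have hs : ((od ++ rest).length = od.length + rest.length) := by simp
    simp only [pvStepA, hget, h, if_pos]
    rw [show n - 1 - ev.length - od.length = rest.length from by omega,
        show n - 1 - ev.length = od.length + rest.length from by omega, hsh,
        ← hs, pv_set_mid]
  · simp [pvStepA, hget, h]

-- running the loop over the remaining suffix completes the partition
lemma pv_loop_inv (n : Nat) : ∀ (suf pre : List Int),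
    n = pre.length + suf.length →
    (List.foldl (fun s _ => pvStepA n s)
        (pvOdds pre ++ suf ++ (pvEvens pre).reverse, (pvOdds pre).length, (pvEvens pre).length)
        (List.range suf.length))
      = (pvOdds (pre ++ suf) ++ (pvEvens (pre ++ suf)).reverse,
         (pvOdds (pre ++ suf)).length, (pvEvens (pre ++ suf)).length) := by
  intro suf; induction suf with
  | nil => intro pre _; simp
  | cons x suf ih =>
    intro pre hn
    have hlen : n = (pvOdds pre).length + (1 + (suf.length + (pvEvens pre).length)) := by
      have := pv_filter_len pre
      simp only [List.length_cons] at hn; omega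
    have hstep := pv_step_inv n (pvOdds pre) suf (pvEvens pre) x hlen
    have hr : List.range (x :: suf).length = 0 :: (List.range suf.length).map (· + 1) := by
      simp [List.range_succ_eq_map]
    rw [hr]
    simp only [List.foldl_cons]
    have hmap : ∀ (s : List Int × Nat × Nat),
        List.foldl (fun s _ => pvStepA n s) s ((List.range suf.length).map (· + 1))
          = List.foldl (fun s _ => pvStepA n s) s (List.range suf.length) := by
      intro s; rw [List.foldl_map]
    by_cases h : x % 2 = 0
    · have hpre : pvOdds (pre ++ [x]) = pvOdds pre ∧ pvEvens (pre ++ [x]) = pvEvens pre ++ [x] := by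
        have h1 : pvOdds [x] = [] := by simp [pvOdds, h]
        have h2 : pvEvens [x] = [x] := by simp [pvEvens]; omega
        rw [pvOdds_append, pvEvens_append, h1, h2, List.append_nil]
        exact ⟨rfl, rfl⟩
      rw [show ((pvOdds pre ++ x :: suf ++ (pvEvens pre).reverse, (pvOdds pre).length, (pvEvens pre).length) : List Int × Nat × Nat)
            = (pvOdds pre ++ (x :: suf) ++ (pvEvens pre).reverse, (pvOdds pre).length, (pvEvens pre).length) from rfl]
      rw [hstep]; simp only [h, if_pos]
      rw [hmap]
      have := ih (pre ++ [x])
        (by simp only [List.length_append, List.length_cons, List.length_nil] at hn ⊢; omega)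
      rw [hpre.1, hpre.2] at this
      simpa [List.append_assoc] using this
    · have hpre : pvOdds (pre ++ [x]) = pvOdds pre ++ [x] ∧ pvEvens (pre ++ [x]) = pvEvens pre := by
        have h1 : pvOdds [x] = [x] := by simp [pvOdds]; omega
        have h2 : pvEvens [x] = [] := by simp [pvEvens]; omega
        rw [pvOdds_append, pvEvens_append, h1, h2, List.append_nil]
        exact ⟨rfl, rfl⟩
      rw [show ((pvOdds pre ++ x :: suf ++ (pvEvens pre).reverse, (pvOdds pre).length, (pvEvens pre).length) : List Int × Nat × Nat)
            = (pvOdds pre ++ (x :: suf) ++ (pvEvens pre).reverse, (pvOdds pre).length, (pvEvens pre).length) from rfl]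
      rw [hstep]; simp only [h, if_neg, if_false]
      rw [hmap]
      have := ih (pre ++ [x])
        (by simp only [List.length_append, List.length_cons, List.length_nil] at hn ⊢; omega)
      rw [hpre.1, hpre.2] at this
      simpa [List.append_assoc] using this

-- ===== VERDICT (by name: the statement is the Claim_ definition above) =====
theorem exchange_spec : Claim_equal_exchange := by
  intro nums _
  unfold Spec_exchange exchange exchange_alt
  by_cases h : nums.length ≤ 1
  · simp only [h, if_pos]
    match nums, h with
    | [], _ => simp
    | [x], _ => by_cases hx : x % 2 = 0 <;> simp [List.filter, hx]
  · simp only [h, if_neg, if_false]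
    have := pv_loop_inv nums.length nums [] (by simp)
    simp only [List.nil_append, List.append_nil] at this
    rw [show (pvOdds ([] : List Int)) = [] from rfl, show (pvEvens ([] : List Int)) = [] from rfl] at this
    simp only [List.nil_append, List.append_nil, List.length_nil, List.reverse_nil] at this
    rw [this]
    rfl
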